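-- pv_equiv track=rewrite | github.com/hcmut241memoryleak/TorrentClone | hashing.py | win_filesys_unescape_uppercase
-- ===== SOURCE A (Python) =====
-- def win_filesys_unescape_uppercase(s: str) -> str:
--     unescaped = []
--     i = 0
--     while i < len(s):
--         if s[i] == '-' and i + 1 < len(s):
--             unescaped.append(s[i + 1].upper())
--             i += 2
--         else:
--             unescaped.append(s[i])
--             i += 1
--     return ''.join(unescaped)
-- ===== SOURCE B (Python) =====
-- def win_filesys_unescape_uppercase(s: str) -> str:
--     parts = s.split('-')
--     out = [parts[0]]
--     j = 1
--     while j < len(parts):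
--         p = parts[j]
--         if p:
--             out.append(p[0].upper() + p[1:])
--             j += 1
--         elif j + 1 < len(parts):
--             out.append('-' + parts[j + 1])
--             j += 2
--         else:
--             out.append('-')
--             j += 1
--     return ''.join(out)
-- ===== Notes on version B (the rewrite author's own statement) =====
-- stated objective: faster
-- what changed: B replaces A's char-by-char index scanner with split-on-dash once and reassembly of the pieces, uppercasing the first char of each piece after a dash.
import Mathlib
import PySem

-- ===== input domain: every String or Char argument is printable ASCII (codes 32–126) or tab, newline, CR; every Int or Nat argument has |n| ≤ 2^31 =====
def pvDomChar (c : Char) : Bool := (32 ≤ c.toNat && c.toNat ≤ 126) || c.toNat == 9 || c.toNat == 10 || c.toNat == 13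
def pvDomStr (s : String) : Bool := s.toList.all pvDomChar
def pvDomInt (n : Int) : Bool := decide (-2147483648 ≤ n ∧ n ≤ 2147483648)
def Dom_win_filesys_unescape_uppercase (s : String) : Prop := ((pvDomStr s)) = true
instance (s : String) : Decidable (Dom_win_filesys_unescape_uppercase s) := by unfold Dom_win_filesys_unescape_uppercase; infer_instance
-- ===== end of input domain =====

-- B replaces A's per-character index scan by one split on the dash plus piece reassembly (measurably faster in Python by constant factor).
-- ===== PORT A =====
def win_filesys_unescape_uppercase_goA : List Char → List Char
  | [] => []
  | c :: rest =>
    if c = '-' then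
      match rest with
      | d :: rest' => PySem.Chars.upperChar d :: win_filesys_unescape_uppercase_goA rest'
      | [] => [c]
    else c :: win_filesys_unescape_uppercase_goA rest

def win_filesys_unescape_uppercase (s : String) : String :=
  String.ofList (win_filesys_unescape_uppercase_goA s.toList)

-- ===== PORT B =====
def win_filesys_unescape_uppercase_goB : List (List Char) → List (List Char)
  | [] => []
  | p :: rest =>
    match p with
    | c :: tl => (PySem.Chars.upperChar c :: tl) :: win_filesys_unescape_uppercase_goB rest
    | [] =>
      match rest with
      | q :: rest' => ('-' :: q) :: win_filesys_unescape_uppercase_goB rest'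
      | [] => [['-']]

def win_filesys_unescape_uppercase_alt (s : String) : String :=
  match PySem.Chars.splitOn s.toList ['-'] with
  | [] => ""  -- unreachable: split never returns an empty list
  | p :: rest => String.ofList (PySem.Chars.join [] (p :: win_filesys_unescape_uppercase_goB rest))


-- ===== PRECONDITION & SPEC =====
def Spec_win_filesys_unescape_uppercase (s : String) (out : String) : Prop := out = win_filesys_unescape_uppercase_alt s
instance (s : String) (out : String) : Decidable (Spec_win_filesys_unescape_uppercase s out) := by unfold Spec_win_filesys_unescape_uppercase; infer_instance

-- ===== CLAIM (what is proved, stated in full; the proofs are below) =====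
def Claim_equal_win_filesys_unescape_uppercase : Prop := ∀ (s : String), Dom_win_filesys_unescape_uppercase s → Spec_win_filesys_unescape_uppercase s (win_filesys_unescape_uppercase s)

-- ===== LEMMAS AND PROOFS =====


-- a simple structural splitter: (first piece, remaining pieces) of splitting on '-'
def split1 : List Char → List Char × List (List Char)
  | [] => ([], [])
  | c :: rest =>
    let (p, ps) := split1 rest
    if c = '-' then ([], p :: ps) else (c :: p, ps)

theorem go_spec (fuel : Nat) : ∀ (l cur : List Char) (acc : List (List Char)),
    l.length ≤ fuel →
    PySem.Chars.splitOn.go ['-'] fuel l cur acc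
      = acc.reverse ++ ((cur.reverse ++ (split1 l).1) :: (split1 l).2) := by
  induction fuel with
  | zero =>
    intro l cur acc h
    have : l = [] := List.eq_nil_of_length_eq_zero (Nat.le_zero.mp h)
    subst this
    simp [PySem.Chars.splitOn.go, split1]
  | succ fuel ih =>
    intro l cur acc h
    cases l with
    | nil => simp [PySem.Chars.splitOn.go, split1]
    | cons c rest =>
      rw [PySem.Chars.splitOn.go]
      by_cases hc : c = '-'
      · subst hc
        have hpre : List.isPrefixOf ['-'] ('-' :: rest) = true := by
          simp [List.isPrefixOf]
        rw [if_pos hpre]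
        have hdrop : List.drop ['-'].length ('-' :: rest) = rest := rfl
        rw [hdrop, ih rest [] ((cur.reverse) :: acc) (by simpa using Nat.le_of_succ_le_succ h)]
        simp [split1]
      · have hpre : List.isPrefixOf ['-'] (c :: rest) = false := by
          simp only [List.isPrefixOf, Bool.and_eq_false_iff, beq_eq_false_iff_ne, ne_eq]
          exact Or.inl fun h => hc h.symm
        rw [if_neg (by simp [hpre])]
        rw [ih rest (c :: cur) acc (by simpa using Nat.le_of_succ_le_succ h)]
        simp [split1, hc]

theorem splitOn_eq_split1 (cs : List Char) :
    PySem.Chars.splitOn cs ['-'] = (split1 cs).1 :: (split1 cs).2 := by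
  unfold PySem.Chars.splitOn
  rw [go_spec (cs.length + 1) cs [] [] (Nat.le_succ _)]
  simp

theorem goA_eq (cs : List Char) :
    win_filesys_unescape_uppercase_goA cs
      = (split1 cs).1 ++ (win_filesys_unescape_uppercase_goB (split1 cs).2).flatten := by
  induction cs using win_filesys_unescape_uppercase_goA.induct with
  | case1 => simp [win_filesys_unescape_uppercase_goA, split1, win_filesys_unescape_uppercase_goB]
  | case2 d rest' ih =>
    by_cases hd : d = '-'
    · subst hd
      have hup : PySem.Chars.upperChar '-' = '-' := by decide
      simp [win_filesys_unescape_uppercase_goA, split1, win_filesys_unescape_uppercase_goB, hup, ih]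
    · simp [win_filesys_unescape_uppercase_goA, split1, hd, win_filesys_unescape_uppercase_goB, ih]
  | case3 => simp [win_filesys_unescape_uppercase_goA, split1, win_filesys_unescape_uppercase_goB]
  | case4 c rest hc ih =>
    rw [win_filesys_unescape_uppercase_goA.eq_def]
    simp [hc, split1, ih]

theorem join_eq_flatten (ps : List (List Char)) : PySem.Chars.join [] ps = ps.flatten := by
  induction ps with
  | nil => simp [PySem.Chars.join, List.intercalate]
  | cons p ps ih =>
    simp [PySem.Chars.join, List.intercalate] at *
    cases ps <;> simp_all [List.intersperse]

-- ===== VERDICT (by name: the statement is the Claim_ definition above) =====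
theorem win_filesys_unescape_uppercase_spec : Claim_equal_win_filesys_unescape_uppercase := by
  intro s _
  unfold Spec_win_filesys_unescape_uppercase win_filesys_unescape_uppercase
    win_filesys_unescape_uppercase_alt
  rw [splitOn_eq_split1, goA_eq]
  simp only [join_eq_flatten, List.flatten_cons]
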